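-- pv_equiv track=rewrite | github.com/zzzl-523/PS-Python-for-CodingTest | 삼성sw기출/감시.py | rorate
-- ===== SOURCE A (Python) =====
-- def rorate(A):
--     # A = 각 CCTV
--     A_rotates = [[] for _ in range(4)]
--     for a in A:
--         a_90 = (a[1], -a[0])
--         a_180 = (-a[0], -a[1])
--         a_270 = (-a[1], a[0])
--         A_rotates[0].append(a)
--         A_rotates[1].append(a_90)
--         A_rotates[2].append(a_180)
--         A_rotates[3].append(a_270)
--     return A_rotates
-- ===== SOURCE B (Python) =====
-- def rorate(A):
--     # Build each rotation level by mapping one 90-degree step over the previous level.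
--     out = []
--     cur = A
--     for _ in range(4):
--         out.append(cur)
--         cur = [(y, -x) for (x, y) in cur]
--     return out
-- ===== Notes on version B (the rewrite author's own statement) =====
-- stated objective: simpler
-- what changed: Instead of computing four closed-form rotations per element in one pass, B iterates a single 90-degree rotation map four times, each level derived from the previous one.
import Mathlib
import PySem

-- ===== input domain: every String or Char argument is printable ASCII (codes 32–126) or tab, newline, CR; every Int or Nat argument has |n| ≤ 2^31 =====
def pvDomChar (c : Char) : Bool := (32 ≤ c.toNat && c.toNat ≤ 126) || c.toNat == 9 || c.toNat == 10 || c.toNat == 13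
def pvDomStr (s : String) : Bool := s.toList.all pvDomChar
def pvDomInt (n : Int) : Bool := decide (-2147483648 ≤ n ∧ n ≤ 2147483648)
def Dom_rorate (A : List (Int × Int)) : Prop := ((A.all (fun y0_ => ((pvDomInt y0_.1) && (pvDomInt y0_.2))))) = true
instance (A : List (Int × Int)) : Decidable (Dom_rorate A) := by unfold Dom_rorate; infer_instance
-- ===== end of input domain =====

-- B builds each rotation level by iterating one 90° rotation map over the previous level,
-- instead of A's four closed-form rotations computed per element in a single pass (objective: simpler).


-- ===== PORT A =====
-- One pass over A, appending the original and its three closed-form rotations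
-- to four accumulated lists (Python's A_rotates[0..3]).
def rorate (A : List (Int × Int)) : List (List (Int × Int)) :=
  let r := A.foldl
    (fun (s : List (Int × Int) × List (Int × Int) × List (Int × Int) × List (Int × Int)) a =>
      (s.1 ++ [a],
       s.2.1 ++ [(a.2, -a.1)],
       s.2.2.1 ++ [(-a.1, -a.2)],
       s.2.2.2 ++ [(-a.2, a.1)]))
    ([], [], [], [])
  [r.1, r.2.1, r.2.2.1, r.2.2.2]

-- ===== PORT B =====
-- Four iterations: append the current level, then map one 90° rotation over it.
def rorate_alt (A : List (Int × Int)) : List (List (Int × Int)) :=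
  let s := (List.range 4).foldl
    (fun (s : List (List (Int × Int)) × List (Int × Int)) _ =>
      (s.1 ++ [s.2], s.2.map (fun v => (v.2, -v.1))))
    ([], A)
  s.1

-- ===== PRECONDITION & SPEC =====
def Spec_rorate (A : List (Int × Int)) (out : List (List (Int × Int))) : Prop := out = rorate_alt A
instance (A : List (Int × Int)) (out : List (List (Int × Int))) : Decidable (Spec_rorate A out) := by unfold Spec_rorate; infer_instance

-- ===== CLAIM (what is proved, stated in full; the proofs are below) =====
def Claim_equal_rorate : Prop := ∀ (A : List (Int × Int)), Dom_rorate A → Spec_rorate A (rorate A)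

-- ===== LEMMAS AND PROOFS =====

lemma rorate_foldl (A : List (Int × Int))
    (l0 l1 l2 l3 : List (Int × Int)) :
    A.foldl
      (fun (s : List (Int × Int) × List (Int × Int) × List (Int × Int) × List (Int × Int)) a =>
        (s.1 ++ [a],
         s.2.1 ++ [(a.2, -a.1)],
         s.2.2.1 ++ [(-a.1, -a.2)],
         s.2.2.2 ++ [(-a.2, a.1)]))
      (l0, l1, l2, l3)
    = (l0 ++ A,
       l1 ++ A.map (fun a => (a.2, -a.1)),
       l2 ++ A.map (fun a => (-a.1, -a.2)),
       l3 ++ A.map (fun a => (-a.2, a.1))) := by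
  induction A generalizing l0 l1 l2 l3 with
  | nil => simp
  | cons a t ih => simp [List.foldl, ih]

-- ===== VERDICT (by name: the statement is the Claim_ definition above) =====
theorem rorate_spec : Claim_equal_rorate := by
  intro A _
  show rorate A = rorate_alt A
  have h2 : ((fun a : Int × Int => (a.2, -a.1)) ∘ fun a : Int × Int => (a.2, -a.1))
      = fun a : Int × Int => (-a.1, -a.2) := by funext a; simp [Function.comp]
  simp [rorate, rorate_alt, List.range, List.range.loop, rorate_foldl, List.map_map, h2]
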